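-- pv_equiv track=rewrite | github.com/ecunha1996/GSMMutils | src/GSMMutils/model/FAME2Biomass.py | get_metmat
-- ===== SOURCE A (Python) =====
-- def get_metmat(final_map, set_of_names, chains_map):
--     faas = []
--     met_mat = [[1 for _ in range(len(final_map.keys()))]]
--     for fatty_acid_name, code in chains_map.items():
--         temp = []
--         for lipid in set_of_names:
--             splited = lipid.split("__")
--             chain_1 = splited[1]
--             chain_2 = splited[2]
--             counter = [chain_1, chain_2]
--             temp.append(counter.count(code))
--             faas += counter
--         met_mat.append(temp)
--     return met_mat, faas
-- ===== SOURCE B (Python) =====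
-- def get_metmat(final_map, set_of_names, chains_map):
--     # Inverted index: one pass over the lipids builds chain -> per-lipid count vector;
--     # each matrix row is then a single dict lookup instead of a scan over the lipids.
--     met_mat = [[1] * len(final_map)]
--     faas = []
--     if chains_map:
--         n = len(set_of_names)
--         occ = {}
--         flat = []
--         for i, lipid in enumerate(set_of_names):
--             parts = lipid.split("__")
--             for chain in (parts[1], parts[2]):
--                 flat.append(chain)
--                 row = occ.get(chain, [0] * n)
--                 row[i] += 1
--                 occ[chain] = row
--         faas = flat * len(chains_map)
--         zero = [0] * n
--         for code in chains_map.values():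
--             met_mat.append(occ.get(code, zero))
--     return met_mat, faas
-- ===== Notes on version B (the rewrite author's own statement) =====
-- stated objective: alternative
-- what changed: B builds an inverted index in one pass over the lipids (a dict mapping each chain string to its per-lipid occurrence vector) and then emits each matrix row by a single dict lookup per fatty-acid code, and replicates the flat chain list for faas, instead of A's nested loop that re-splits and re-scans every lipid for every code.
import Mathlib
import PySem

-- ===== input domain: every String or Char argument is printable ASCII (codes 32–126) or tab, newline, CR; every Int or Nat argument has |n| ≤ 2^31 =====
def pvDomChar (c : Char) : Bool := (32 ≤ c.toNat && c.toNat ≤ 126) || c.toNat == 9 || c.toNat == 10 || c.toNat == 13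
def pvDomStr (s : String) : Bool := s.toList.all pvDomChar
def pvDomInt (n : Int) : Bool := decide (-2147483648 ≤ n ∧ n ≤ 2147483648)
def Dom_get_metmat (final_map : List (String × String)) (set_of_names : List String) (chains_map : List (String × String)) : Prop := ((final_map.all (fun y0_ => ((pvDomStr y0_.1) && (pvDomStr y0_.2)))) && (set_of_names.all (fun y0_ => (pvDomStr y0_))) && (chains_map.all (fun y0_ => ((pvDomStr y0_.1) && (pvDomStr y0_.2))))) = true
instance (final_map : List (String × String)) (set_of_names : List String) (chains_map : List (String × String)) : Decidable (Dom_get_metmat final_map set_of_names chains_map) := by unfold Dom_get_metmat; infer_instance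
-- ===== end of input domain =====

-- B replaces A's nested re-split-and-scan with an inverted index (chain → per-lipid count vector)
-- built in one pass, rows then being single dict lookups; same cost class, different algorithm.

-- ===== PORT A =====
def get_metmat (final_map : List (String × String)) (set_of_names : List String) (chains_map : List (String × String)) : List (List Int) × List String :=
  let fmd := PySem.Dict.ofList final_map
  let cmd := PySem.Dict.ofList chains_map
  let st0 : List (List Int) × List String := ([List.replicate fmd.keys.length (1 : Int)], [])
  cmd.items.foldl
    (fun (st : List (List Int) × List String) item =>
      let p := set_of_names.foldl
        (fun (st2 : List Int × List String) lipid =>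
          let splited := (PySem.Str.split? lipid "__").getD []
          let chain_1 := (PySem.List.pyGet? splited (1 : Int)).getD ""
          let chain_2 := (PySem.List.pyGet? splited (2 : Int)).getD ""
          let counter := [chain_1, chain_2]
          (st2.1 ++ [(PySem.List.count counter item.2 : Int)], st2.2 ++ counter))
        ([], st.2)
      (st.1 ++ [p.1], p.2))
    st0

-- ===== PORT B =====
-- loop body for `for chain in (parts[1], parts[2]):` — append chain to flat, bump occ[chain][i]
-- (row = occ.get(chain, [0]*n); row[i] += 1; occ[chain] = row  IS  Dict.modify; index i from
-- enumerate is always 0 ≤ i < n, so the Nat index of List.set/getD is exact here).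
def pvChainAdd (n i : Nat) (st : PySem.Dict String (List Int) × List String) (chain : String) :
    PySem.Dict String (List Int) × List String :=
  (st.1.modify chain (List.replicate n (0 : Int)) (fun row => row.set i (row.getD i 0 + 1)),
   st.2 ++ [chain])

def get_metmat_alt (final_map : List (String × String)) (set_of_names : List String) (chains_map : List (String × String)) : List (List Int) × List String :=
  let fmd := PySem.Dict.ofList final_map
  let cmd := PySem.Dict.ofList chains_map
  let met_mat : List (List Int) := [List.replicate fmd.size (1 : Int)]
  if chains_map.isEmpty then (met_mat, [])
  else
    let n := set_of_names.length
    let st := set_of_names.zipIdx.foldl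
      (fun st li =>
        let parts := (PySem.Str.split? li.1 "__").getD []
        let c1 := (PySem.List.pyGet? parts (1 : Int)).getD ""
        let c2 := (PySem.List.pyGet? parts (2 : Int)).getD ""
        [c1, c2].foldl (pvChainAdd n li.2) st)
      ((PySem.Dict.empty : PySem.Dict String (List Int)), ([] : List String))
    let faas := (List.replicate cmd.size st.2).flatten
    let zero := List.replicate n (0 : Int)
    let rows := cmd.values.map (fun code => st.1.getD code zero)
    (met_mat ++ rows, faas)

-- ===== PRECONDITION & SPEC =====
-- Pre_ excludes exactly the inputs where Python A raises IndexError: a nonempty chains_map together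
-- with some lipid whose split on "__" has fewer than 3 pieces.
def Pre_get_metmat (final_map : List (String × String)) (set_of_names : List String) (chains_map : List (String × String)) : Prop :=
  chains_map = [] ∨ ∀ l ∈ set_of_names, 3 ≤ ((PySem.Str.split? l "__").getD []).length
instance (final_map : List (String × String)) (set_of_names : List String) (chains_map : List (String × String)) : Decidable (Pre_get_metmat final_map set_of_names chains_map) := by unfold Pre_get_metmat; infer_instance
def pvWitness_get_metmat : (List (String × String)) × List String × (List (String × String)) :=
  ([("glycerol", "m1")], ["DG__16:0__18:1", "TG__16:0__16:0"], [("palmitate", "16:0")])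

def Spec_get_metmat (final_map : List (String × String)) (set_of_names : List String) (chains_map : List (String × String)) (out : List (List Int) × List String) : Prop := out = get_metmat_alt final_map set_of_names chains_map
instance (final_map : List (String × String)) (set_of_names : List String) (chains_map : List (String × String)) (out : List (List Int) × List String) : Decidable (Spec_get_metmat final_map set_of_names chains_map out) := by unfold Spec_get_metmat; infer_instance

-- ===== CLAIM (what is proved, stated in full; the proofs are below) =====
def Claim_equal_get_metmat : Prop := ∀ (final_map : List (String × String)) (set_of_names : List String) (chains_map : List (String × String)), Dom_get_metmat final_map set_of_names chains_map → Pre_get_metmat final_map set_of_names chains_map → Spec_get_metmat final_map set_of_names chains_map (get_metmat final_map set_of_names chains_map)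

-- ===== LEMMAS AND PROOFS =====

-- The two chain fields of a lipid name, as both ports compute them.
def pvC1 (l : String) : String := (PySem.List.pyGet? ((PySem.Str.split? l "__").getD []) (1 : Int)).getD ""
def pvC2 (l : String) : String := (PySem.List.pyGet? ((PySem.Str.split? l "__").getD []) (2 : Int)).getD ""

-- how many of the two chains of lipid l equal c
def pvCnt (c l : String) : Int :=
  (if c = pvC1 l then 1 else 0) + (if c = pvC2 l then 1 else 0)

theorem pv_count_eq_cnt (l code : String) :
    ((PySem.List.count [pvC1 l, pvC2 l] code : Nat) : Int) = pvCnt code l := by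
  have e1 : (code = pvC1 l) ↔ (pvC1 l = code) := eq_comm
  have e2 : (code = pvC2 l) ↔ (pvC2 l = code) := eq_comm
  by_cases h1 : pvC1 l = code <;> by_cases h2 : pvC2 l = code <;>
    simp [PySem.List.count_eq, pvCnt, e1, e2, h1, h2]

-- ---- A-side shape ----
theorem pv_inner_eq (code : String) (names : List String) (t0 : List Int) (f0 : List String) :
    names.foldl
      (fun (st2 : List Int × List String) lipid =>
        (st2.1 ++ [(PySem.List.count [pvC1 lipid, pvC2 lipid] code : Int)],
         st2.2 ++ [pvC1 lipid, pvC2 lipid]))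
      (t0, f0)
      = (t0 ++ names.map (fun l => (PySem.List.count [pvC1 l, pvC2 l] code : Int)),
         f0 ++ names.flatMap (fun l => [pvC1 l, pvC2 l])) := by
  induction names generalizing t0 f0 with
  | nil => simp
  | cons x xs ih => rw [List.foldl_cons, ih]; simp

theorem pv_outer_eq (names : List String) (items : List (String × String))
    (m0 : List (List Int)) (f0 : List String) :
    items.foldl
      (fun (st : List (List Int) × List String) item =>
        (st.1 ++ [names.map (fun l => (PySem.List.count [pvC1 l, pvC2 l] item.2 : Int))],
         st.2 ++ names.flatMap (fun l => [pvC1 l, pvC2 l])))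
      (m0, f0)
      = (m0 ++ items.map (fun it => names.map (fun l => (PySem.List.count [pvC1 l, pvC2 l] it.2 : Int))),
         f0 ++ (List.replicate items.length (names.flatMap (fun l => [pvC1 l, pvC2 l]))).flatten) := by
  induction items generalizing m0 f0 with
  | nil => simp
  | cons it rest ih =>
      rw [List.foldl_cons, ih]
      simp [List.replicate_succ]

-- ---- B-side: effect of one chain bump on every row of the index ----
theorem pv_chainAdd_fst (n j : Nat) (st : PySem.Dict String (List Int) × List String)
    (a c : String) (g : List Int) (t : List Int) (v : Int)
    (hg : g.length = j) (hd : st.1.getD c (List.replicate n 0) = g ++ v :: t) :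
    (pvChainAdd n j st a).1.getD c (List.replicate n 0)
      = g ++ (v + if c = a then 1 else 0) :: t := by
  have hfst : (pvChainAdd n j st a).1
      = st.1.modify a (List.replicate n 0) (fun row => row.set j (row.getD j 0 + 1)) := rfl
  rw [hfst]
  by_cases hca : c = a
  · subst hca
    simp [hd, ← hg, List.set_append_right]
  · rw [PySem.Dict.getD_modify, if_neg hca, hd]
    simp [hca]

-- ---- B-side: the whole enumerate fold ----
theorem pv_fold_eq (names : List String) (j n : Nat) (d : PySem.Dict String (List Int))
    (fl : List String) (F : String → List Int)
    (hlen : j + names.length = n)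
    (hF : ∀ c, (F c).length = j)
    (hd : ∀ c, d.getD c (List.replicate n 0) = F c ++ List.replicate (n - j) 0) :
    (∀ c, ((names.zipIdx j).foldl
        (fun st li =>
          [pvC1 li.1, pvC2 li.1].foldl (pvChainAdd n li.2) st) (d, fl)).1.getD c (List.replicate n 0)
        = F c ++ names.map (pvCnt c))
    ∧ ((names.zipIdx j).foldl
        (fun st li =>
          [pvC1 li.1, pvC2 li.1].foldl (pvChainAdd n li.2) st) (d, fl)).2
        = fl ++ names.flatMap (fun l => [pvC1 l, pvC2 l]) := by
  induction names generalizing j d fl F with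
  | nil =>
      have hz : n - j = 0 := by simp at hlen; omega
      constructor
      · intro c; simpa [hz] using hd c
      · simp
  | cons x xs ih =>
      have hrep : List.replicate (n - j) (0 : Int) = 0 :: List.replicate (n - (j + 1)) 0 := by
        have h1 : n - j = (n - (j + 1)) + 1 := by simp at hlen; omega
        rw [h1, List.replicate_succ]
      -- one lipid = two chain bumps
      have hstep1 : ∀ c,
          ([pvC1 x, pvC2 x].foldl (pvChainAdd n j) (d, fl)).1.getD c (List.replicate n 0)
            = (F c ++ [pvCnt c x]) ++ List.replicate (n - (j + 1)) 0 := by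
        intro c
        have h1 := pv_chainAdd_fst n j (d, fl) (pvC1 x) c (F c)
          (List.replicate (n - (j + 1)) 0) 0 (hF c) (by rw [hd c, hrep])
        have h2 := pv_chainAdd_fst n j (pvChainAdd n j (d, fl) (pvC1 x)) (pvC2 x) c (F c)
          (List.replicate (n - (j + 1)) 0) (0 + if c = pvC1 x then 1 else 0) (hF c) h1
        simp only [List.foldl_cons, List.foldl_nil]
        rw [h2]
        have hval : ((0 + if c = pvC1 x then (1 : Int) else 0) + if c = pvC2 x then 1 else 0)
            = pvCnt c x := by
          unfold pvCnt; ring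
        rw [hval]
        simp
      have hstep2 : ([pvC1 x, pvC2 x].foldl (pvChainAdd n j) (d, fl)).2
          = fl ++ [pvC1 x, pvC2 x] := by
        simp [pvChainAdd]
      have hz : (x :: xs).zipIdx j = (x, j) :: xs.zipIdx (j + 1) := by
        simp [List.zipIdx_cons]
      rw [hz, List.foldl_cons]
      obtain ⟨i1, i2⟩ := ih (j + 1)
        (([pvC1 x, pvC2 x].foldl (pvChainAdd n j) (d, fl)).1)
        (([pvC1 x, pvC2 x].foldl (pvChainAdd n j) (d, fl)).2)
        (fun c => F c ++ [pvCnt c x])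
        (by simp at hlen ⊢; omega)
        (fun c => by simp [hF c])
        hstep1
      constructor
      · intro c
        exact (i1 c).trans (by simp)
      · exact i2.trans (by rw [hstep2]; simp)

-- ===== VERDICT (by name: the statement is the Claim_ definition above) =====
theorem get_metmat_spec : Claim_equal_get_metmat := by
  intro fm names cm _hdom _hpre
  unfold Spec_get_metmat get_metmat get_metmat_alt
  have hfunA : (fun (st : List (List Int) × List String) (item : String × String) =>
      let p := names.foldl
        (fun (st2 : List Int × List String) lipid =>
          let splited := (PySem.Str.split? lipid "__").getD []
          let chain_1 := (PySem.List.pyGet? splited (1 : Int)).getD ""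
          let chain_2 := (PySem.List.pyGet? splited (2 : Int)).getD ""
          let counter := [chain_1, chain_2]
          (st2.1 ++ [(PySem.List.count counter item.2 : Int)], st2.2 ++ counter))
        ([], st.2)
      (st.1 ++ [p.1], p.2))
      = (fun (st : List (List Int) × List String) (item : String × String) =>
        (st.1 ++ [names.map (fun l => (PySem.List.count [pvC1 l, pvC2 l] item.2 : Int))],
         st.2 ++ names.flatMap (fun l => [pvC1 l, pvC2 l]))) := by
    funext st item
    show (let p := names.foldl (fun (st2 : List Int × List String) lipid =>
        (st2.1 ++ [(PySem.List.count [pvC1 lipid, pvC2 lipid] item.2 : Int)],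
         st2.2 ++ [pvC1 lipid, pvC2 lipid])) ([], st.2)
      (st.1 ++ [p.1], p.2)) = _
    rw [pv_inner_eq]
    simp
  cases cm with
  | nil =>
      simp [PySem.Dict.ofList, PySem.Dict.update, PySem.Dict.empty,
        PySem.Dict.keys, PySem.Dict.size]
  | cons c cs =>
      rw [hfunA, pv_outer_eq]
      obtain ⟨h1, h2⟩ := pv_fold_eq names 0 names.length PySem.Dict.empty []
        (fun _ => []) (by simp) (by simp)
        (fun c => by simp [PySem.Dict.getD_empty])
      show _ = ([List.replicate (PySem.Dict.ofList fm).size (1 : Int)]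
          ++ (PySem.Dict.ofList (c :: cs)).values.map (fun code =>
            ((names.zipIdx.foldl
                (fun st li => [pvC1 li.1, pvC2 li.1].foldl (pvChainAdd names.length li.2) st)
                ((PySem.Dict.empty : PySem.Dict String (List Int)), ([] : List String))).1.getD
              code (List.replicate names.length 0))),
        (List.replicate (PySem.Dict.ofList (c :: cs)).size
          ((names.zipIdx.foldl
              (fun st li => [pvC1 li.1, pvC2 li.1].foldl (pvChainAdd names.length li.2) st)
              ((PySem.Dict.empty : PySem.Dict String (List Int)), ([] : List String))).2)).flatten)
      rw [Prod.mk.injEq]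
      constructor
      · congr 1
        · simp [PySem.Dict.keys, PySem.Dict.size]
        · simp only [PySem.Dict.values, List.map_map]
          apply List.map_congr_left
          intro it _
          rw [Function.comp_apply, h1 it.2]
          simp only [List.nil_append]
          apply List.map_congr_left
          intro l _
          exact pv_count_eq_cnt l it.2
      · rw [h2]
        simp [PySem.Dict.size]
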